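-- pv_equiv track=rewrite | github.com/fer-kt/scripts-utils | propagacion.py | propagar
-- ===== SOURCE A (Python) =====
-- def propagar(lista):
--     temporal = [] # se guardan los segmentos entre los -1
--     final = []
--     for i, e in enumerate(lista):
--         temporal.append(e) #se guarda el valor en la lista temporal
--         if e == -1 or i == (len(lista)-1): #  si es -1 o el último elemento, recorre el segmento
--             if 1 in temporal: # si es que hay uno encendido en el segmento, debe encender los demas
--                 for t in temporal:
--                     if t == 0:
--                         final.append(1)
--                     else:
--                         final.append(t)
--             else: # no hay ninguno encendido en el segmento, lo pasamos a la lista final tal cual está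
--                 for t in temporal:
--                     final.append(t)
--             temporal= []
--
--
--     return final
-- ===== SOURCE B (Python) =====
-- def propagar(lista):
--     # Backward sweep: right[i] = True iff a 1 occurs at or after i within i's segment
--     # (segments end at each -1). Then one forward streaming sweep emits the result:
--     # a 0 becomes 1 iff a 1 occurs somewhere in its segment (before it: has1; after: right[i]).
--     n = len(lista)
--     right = [False] * n
--     has1 = False
--     for i in range(n - 1, -1, -1):
--         e = lista[i]
--         if e == -1:
--             has1 = False
--         else:
--             has1 = has1 or e == 1
--         right[i] = has1
--     out = []
--     has1 = False
--     for i, e in enumerate(lista):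
--         has1 = has1 or e == 1
--         if e == 0 and (has1 or right[i]):
--             out.append(1)
--         else:
--             out.append(e)
--         if e == -1:
--             has1 = False
--     return out
-- ===== Notes on version B (the rewrite author's own statement) =====
-- stated objective: alternative
-- what changed: B drops A's segment buffering entirely: a backward boolean sweep records for each position whether a 1 occurs later in its segment, then a single forward streaming sweep emits each element immediately, turning a 0 into 1 when a 1 occurs before it (carried flag) or after it (precomputed flag).
import Mathlib
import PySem

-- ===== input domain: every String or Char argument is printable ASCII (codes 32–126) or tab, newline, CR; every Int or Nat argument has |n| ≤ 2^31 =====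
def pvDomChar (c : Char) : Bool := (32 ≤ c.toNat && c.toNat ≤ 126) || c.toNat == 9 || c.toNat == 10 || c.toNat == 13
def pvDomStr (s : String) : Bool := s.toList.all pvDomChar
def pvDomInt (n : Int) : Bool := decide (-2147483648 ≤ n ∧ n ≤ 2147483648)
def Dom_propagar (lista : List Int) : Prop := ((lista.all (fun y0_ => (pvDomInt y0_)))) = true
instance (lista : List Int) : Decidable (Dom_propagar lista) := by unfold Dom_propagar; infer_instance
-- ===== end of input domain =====

-- B replaces A's segment buffering by two boolean sweeps (a backward lookahead pass and a
-- forward streaming pass); objective: alternative algorithm of the same cost. Both are total.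

-- ===== PORT A =====
-- A's loop, step for step: `temporal` accumulates, a flush happens when e == -1 or at the last
-- element (i == len(lista)-1, i.e. the rest of the list is empty); the inner for-loops over
-- `temporal` appending to `final` are the two foldl's.
def propagarGo (temporal final : List Int) : List Int → List Int
  | [] => final
  | e :: rest =>
    let temporal := temporal ++ [e]
    if e = -1 ∨ rest = [] then
      let final :=
        if (1 : Int) ∈ temporal then
          temporal.foldl (fun f t => f ++ [if t = 0 then (1 : Int) else t]) final
        else
          temporal.foldl (fun f t => f ++ [t]) final
      propagarGo [] final rest
    else
      propagarGo temporal final rest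

def propagar (lista : List Int) : List Int := propagarGo [] [] lista

-- ===== PORT B =====
-- Source B's backward sweep: right[i] = has1 carried from the right, reset at -1;
-- the carried value entering step i is the flag stored at i+1, i.e. the head of the tail.
def rightFlags : List Int → List Bool
  | [] => []
  | e :: rest =>
    let rs := rightFlags rest
    (if e = -1 then false else (rs.headD false || decide (e = 1))) :: rs

-- Source B's forward streaming sweep, consuming the flags in lockstep.
def bGo (has1 : Bool) : List Int → List Bool → List Int
  | [], _ => []
  | e :: rest, fs =>
    let f := fs.headD false
    let has1' := has1 || decide (e = 1)
    let out : Int := if e = 0 ∧ (has1' || f) = true then 1 else e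
    out :: bGo (if e = -1 then false else has1') rest fs.tail

def propagar_alt (lista : List Int) : List Int := bGo false lista (rightFlags lista)

-- ===== PRECONDITION & SPEC =====
def Spec_propagar (lista : List Int) (out : List Int) : Prop := out = propagar_alt lista
instance (lista : List Int) (out : List Int) : Decidable (Spec_propagar lista out) := by unfold Spec_propagar; infer_instance

-- ===== CLAIM (what is proved, stated in full; the proofs are below) =====
def Claim_equal_propagar : Prop := ∀ (lista : List Int), Dom_propagar lista → Spec_propagar lista (propagar lista)

-- ===== LEMMAS AND PROOFS =====

/-- What one element becomes when its segment's "contains a 1" flag is `b`. -/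
def emitSeg (b : Bool) (e : Int) : Int := if b = true ∧ e = 0 then 1 else e

theorem emitSeg_false : emitSeg false = fun e => e := by
  funext e; simp [emitSeg]

theorem emitSeg_ne_zero (b : Bool) (e : Int) (h : e ≠ 0) : emitSeg b e = e := by
  simp [emitSeg, h]

theorem bool_ac (a b c : Bool) : ((a || b) || c) = (a || (c || b)) := by
  cases a <;> cases b <;> cases c <;> rfl

/-- An append-per-element foldl is `acc ++ map`. -/
theorem foldl_app_map (g : Int → Int) :
    ∀ (xs acc : List Int), xs.foldl (fun f t => f ++ [g t]) acc = acc ++ xs.map g := by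
  intro xs
  induction xs with
  | nil => simp
  | cons x xs ih => intro acc; simp [List.foldl, ih]

/-- An append-per-element foldl with the identity is `acc ++ xs`. -/
theorem foldl_app_id :
    ∀ (xs acc : List Int), xs.foldl (fun f t => f ++ [t]) acc = acc ++ xs := by
  intro xs
  induction xs with
  | nil => simp
  | cons x xs ih => intro acc; simp [List.foldl, ih]

/-- A's flush of one buffered segment is an `emitSeg` map with the segment's flag. -/
theorem flush_eq (temporal final : List Int) :
    (if (1 : Int) ∈ temporal then
        temporal.foldl (fun f t => f ++ [if t = 0 then (1 : Int) else t]) final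
      else temporal.foldl (fun f t => f ++ [t]) final)
      = final ++ temporal.map (emitSeg (decide ((1 : Int) ∈ temporal))) := by
  by_cases h : (1 : Int) ∈ temporal
  · rw [if_pos h, foldl_app_map]
    congr 1
    apply List.map_congr_left
    intro a _
    simp [emitSeg, h]
  · rw [if_neg h, foldl_app_id, decide_eq_false h, emitSeg_false, List.map_id_fun']
    rfl

/-- One flushing step of A's loop. -/
theorem stepFlush (temporal final : List Int) (e : Int) (rest : List Int)
    (hc : e = -1 ∨ rest = []) :
    propagarGo temporal final (e :: rest)
      = propagarGo [] (final ++ (temporal ++ [e]).map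
          (emitSeg (decide ((1 : Int) ∈ temporal ++ [e])))) rest := by
  simp only [propagarGo]
  rw [if_pos hc, flush_eq]

/-- One buffering step of A's loop. -/
theorem stepNo (temporal final : List Int) (e : Int) (rest : List Int)
    (hc : ¬(e = -1 ∨ rest = [])) :
    propagarGo temporal final (e :: rest) = propagarGo (temporal ++ [e]) final rest := by
  simp only [propagarGo]
  rw [if_neg hc]

theorem rightFlags_cons (e : Int) (rest : List Int) :
    rightFlags (e :: rest)
      = (if e = -1 then false else ((rightFlags rest).headD false || decide (e = 1)))
          :: rightFlags rest := rfl

theorem bGo_cons (h : Bool) (e : Int) (rest : List Int) (fs : List Bool) :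
    bGo h (e :: rest) fs
      = (if e = 0 ∧ ((h || decide (e = 1)) || fs.headD false) = true then (1 : Int) else e)
          :: bGo (if e = -1 then false else h || decide (e = 1)) rest fs.tail := rfl

/-- Main invariant: with input remaining, A's run equals `final`, then the already-buffered
    prefix emitted with the full segment flag (1 in the buffer or in the lookahead), then B's
    forward sweep from here. -/
theorem go_eq : ∀ (l : List Int), l ≠ [] → ∀ temporal final : List Int,
    propagarGo temporal final l =
      final ++ temporal.map (emitSeg (decide ((1 : Int) ∈ temporal) || (rightFlags l).headD false))
        ++ bGo (decide ((1 : Int) ∈ temporal)) l (rightFlags l) := by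
  intro l
  induction l with
  | nil => intro h; exact absurd rfl h
  | cons e rest ih =>
    intro _ temporal final
    by_cases he : e = -1
    · -- flush at -1: the emitted -1 closes the segment, the lookahead flag is false
      subst he
      rw [stepFlush _ _ _ _ (Or.inl rfl)]
      have hm : (decide ((1 : Int) ∈ temporal ++ [-1]) : Bool)
          = decide ((1 : Int) ∈ temporal) := by simp
      rw [List.map_append, hm, rightFlags_cons, if_pos rfl, bGo_cons,
        List.headD_cons, List.tail_cons, Bool.or_false,
        if_pos rfl,
        if_neg (by norm_num :
          ¬((-1 : Int) = 0 ∧ ((decide ((1 : Int) ∈ temporal) || decide ((-1 : Int) = 1)) || false) = true)),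
        List.map_cons, List.map_nil, emitSeg_ne_zero _ _ (by norm_num)]
      rcases eq_or_ne rest [] with hr | hr
      · subst hr
        simp [propagarGo, bGo]
      · rw [ih hr [] _]
        simp
    · rcases eq_or_ne rest [] with hr | hr
      · -- last element, e ≠ -1: flush; the lookahead for the buffer is just this element
        subst hr
        rw [stepFlush _ _ _ _ (Or.inr rfl)]
        have hm : (decide ((1 : Int) ∈ temporal ++ [e]) : Bool)
            = (decide ((1 : Int) ∈ temporal) || decide (e = 1)) := by
          simp [eq_comm]
        rw [List.map_append, hm, rightFlags_cons, if_neg he, bGo_cons,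
          List.headD_cons, List.tail_cons, if_neg he]
        simp only [propagarGo, rightFlags, bGo, List.headD_nil, Bool.false_or,
          List.map_cons, List.map_nil, List.append_nil, List.append_assoc]
        congr 2
        by_cases h0 : e = 0
        · subst h0
          cases hB : (decide ((1 : Int) ∈ temporal) : Bool) <;> simp [emitSeg]
        · rw [emitSeg_ne_zero _ _ h0, if_neg (by rintro ⟨h, _⟩; exact h0 h)]
      · -- middle of a segment: no flush
        rw [stepNo _ _ _ _ (by simp [he, hr]), ih hr (temporal ++ [e]) final]
        have hm : (decide ((1 : Int) ∈ temporal ++ [e]) : Bool)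
            = (decide ((1 : Int) ∈ temporal) || decide (e = 1)) := by
          simp [eq_comm]
        rw [hm, rightFlags_cons, if_neg he, bGo_cons,
          List.headD_cons, List.tail_cons, if_neg he]
        rw [show ((decide ((1 : Int) ∈ temporal) || decide (e = 1))
              || (rightFlags rest).headD false)
            = (decide ((1 : Int) ∈ temporal)
              || ((rightFlags rest).headD false || decide (e = 1))) from
          bool_ac _ _ _]
        rw [List.map_append, List.map_cons, List.map_nil]
        simp only [List.append_assoc, List.singleton_append]
        congr 2
        by_cases h0 : e = 0
        · subst h0
          cases hB : (decide ((1 : Int) ∈ temporal)) <;>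
            cases hw : (rightFlags rest).headD false <;> simp [emitSeg]
        · rw [emitSeg_ne_zero _ _ h0, if_neg (by rintro ⟨h, _⟩; exact h0 h)]

-- ===== VERDICT (by name: the statement is the Claim_ definition above) =====
theorem propagar_spec : Claim_equal_propagar := by
  intro lista _
  unfold Spec_propagar propagar propagar_alt
  cases lista with
  | nil => rfl
  | cons e rest =>
    rw [go_eq _ (by simp) [] []]
    simp
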